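-- pv_equiv track=rewrite | github.com/kingajutrzenka/Programowanie-i-algorytmika | home/lista4.py | sym
-- ===== SOURCE A (Python) =====
-- def sym(n):
-- 	o = 0
-- 	if n>= 10:
-- 		for i in range(0, len(str(n))-1):
-- 			if not int((str(n))[i+1]) > int((str(n))[i]):
-- 				o += 1
-- 		return o == 0
-- 	return n>= 10
-- ===== SOURCE B (Python) =====
-- def sym(n):
--     if n < 10:
--         return False
--     d = [int(c) for c in str(n)]
--     return d == sorted(d) and len(set(d)) == len(d)
-- ===== Notes on version B (the rewrite author's own statement) =====
-- stated objective: simpler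
-- what changed: Replaces the index-based pairwise scan that counts non-increasing adjacent digit pairs with a whole-list check: build the digit list once and test that it equals its sorted version and has no duplicate digits (sorted + distinct = strictly increasing).
import Mathlib
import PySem

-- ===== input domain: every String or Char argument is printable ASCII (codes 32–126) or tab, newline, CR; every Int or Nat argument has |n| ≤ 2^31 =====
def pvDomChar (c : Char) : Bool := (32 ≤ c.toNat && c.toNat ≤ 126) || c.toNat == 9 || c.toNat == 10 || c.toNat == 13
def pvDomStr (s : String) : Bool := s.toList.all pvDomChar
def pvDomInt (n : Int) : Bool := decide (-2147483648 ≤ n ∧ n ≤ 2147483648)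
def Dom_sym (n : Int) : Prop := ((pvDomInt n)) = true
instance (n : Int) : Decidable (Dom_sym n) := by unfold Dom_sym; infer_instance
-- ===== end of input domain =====

-- B replaces A's indexed pairwise scan (counting non-increasing adjacent digit pairs)
-- with a whole-list check: digits equal their sorted order and are all distinct (objective: simpler).


-- int(c) for a single character c; exact on digit characters, which is all str(n) contains when n ≥ 10
def pvDigit (c : Char) : Int := (c.toNat : Int) - 48

-- ===== PORT A =====
def sym (n : Int) : Bool :=
  if 10 ≤ n then
    let s := PySem.Int.toChars n
    let o : Int :=
      (PySem.List.pyRange 0 ((s.length : Int) - 1) 1).foldl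
        (fun o i =>
          if ¬ (pvDigit (PySem.List.pyGetD s (i + 1) '0') > pvDigit (PySem.List.pyGetD s i '0'))
          then o + 1 else o) 0
    o == 0
  else
    decide (10 ≤ n)

-- ===== PORT B =====
def sym_alt (n : Int) : Bool :=
  if n < 10 then false
  else
    let d := (PySem.Int.toChars n).map pvDigit
    decide (d = PySem.List.sorted d (fun x => x) false) && ((PySem.Set.ofList d).length == d.length)

-- ===== PRECONDITION & SPEC =====
def Spec_sym (n : Int) (out : Bool) : Prop := out = sym_alt n
instance (n : Int) (out : Bool) : Decidable (Spec_sym n out) := by unfold Spec_sym; infer_instance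

-- ===== CLAIM (what is proved, stated in full; the proofs are below) =====
def Claim_equal_sym : Prop := ∀ (n : Int), Dom_sym n → Spec_sym n (sym n)

-- ===== LEMMAS AND PROOFS =====

-- A's counting loop yields 0 iff the predicate holds at every visited index
theorem pvFoldCount_eq_zero {P : Int → Prop} [DecidablePred P] :
    ∀ (l : List Int) (acc : Int), 0 ≤ acc →
      ((l.foldl (fun o i => if ¬ P i then o + 1 else o) acc = 0) ↔
        (acc = 0 ∧ ∀ i ∈ l, P i)) := by
  intro l
  induction l with
  | nil => intro acc hacc; simp
  | cons a t ih =>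
    intro acc hacc
    simp only [List.foldl_cons]
    by_cases hP : P a
    · rw [if_neg (by simpa using hP), ih acc hacc]
      constructor
      · rintro ⟨h0, hall⟩
        exact ⟨h0, by
          intro i hi
          rcases List.mem_cons.mp hi with rfl | hi
          · exact hP
          · exact hall i hi⟩
      · rintro ⟨h0, hall⟩
        exact ⟨h0, fun i hi => hall i (List.mem_cons_of_mem _ hi)⟩
    · rw [if_pos (by simpa using hP), ih (acc + 1) (by omega)]
      constructor
      · rintro ⟨h0, _⟩; omega
      · rintro ⟨_, hall⟩; exact absurd (hall a List.mem_cons_self) hP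

-- distinct-count characterisation of Nodup
theorem pvOfListLen_iff_nodup (d : List Int) :
    (PySem.Set.ofList d).length = d.length ↔ d.Nodup := by
  have hperm : (PySem.Set.ofList d).Perm d.dedup :=
    (List.perm_ext_iff_of_nodup (PySem.Set.nodup_ofList d) (List.nodup_dedup d)).mpr
      (fun a => by rw [PySem.Set.mem_ofList, List.mem_dedup])
  rw [hperm.length_eq]
  constructor
  · intro hlen
    rw [← List.dedup_eq_self]
    exact (List.dedup_sublist d).eq_of_length hlen
  · intro hnd
    rw [List.dedup_eq_self.mpr hnd]

-- Pairwise-< characterisation of B's test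
theorem pvAlt_iff (d : List Int) :
    (d = PySem.List.sorted d (fun x => x) false ∧ (PySem.Set.ofList d).length = d.length) ↔
      d.Pairwise (· < ·) := by
  constructor
  · rintro ⟨hsort, hlen⟩
    have hnd : d.Nodup := (pvOfListLen_iff_nodup d).mp hlen
    have hle : d.Pairwise (fun a b => a ≤ b) := by
      have := PySem.List.sorted_pairwise d (fun x => x)
      rw [← hsort] at this; exact this
    exact (hle.and hnd).imp (fun h => lt_of_le_of_ne h.1 h.2)
  · intro hpw
    refine ⟨(PySem.List.sorted_eq_of_perm_of_pairwise_lt d d (fun x => x) (List.Perm.refl d) hpw).symm, ?_⟩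
    exact (pvOfListLen_iff_nodup d).mpr (hpw.imp ne_of_lt)

-- adjacent comparison over the integer index range ↔ IsChain (<)
theorem pvRangeAdj_iff (d : List Int) (c : Char) :
    (∀ i ∈ PySem.List.pyRange 0 ((d.length : Int) - 1) 1,
        PySem.List.pyGetD d i (pvDigit c) < PySem.List.pyGetD d (i + 1) (pvDigit c)) ↔
      List.IsChain (· < ·) d := by
  rw [List.isChain_iff_getElem]
  constructor
  · intro h j hj
    have hj' : (j : Int) ∈ PySem.List.pyRange 0 ((d.length : Int) - 1) 1 := by
      rw [PySem.List.mem_pyRange_one]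
      constructor
      · positivity
      · omega
    have := h (j : Int) hj'
    rw [PySem.List.pyGetD_eq_getElem d _ (by positivity) (by exact_mod_cast Nat.lt_of_succ_lt hj),
        PySem.List.pyGetD_eq_getElem d _ (by positivity) (by omega)] at this
    simp only [show ((j : Int) + 1).toNat = j + 1 by omega, Int.toNat_natCast] at this
    exact this
  · intro h i hi
    rw [PySem.List.mem_pyRange_one] at hi
    have h1 : i < (d.length : Int) := by omega
    have h2 : i + 1 < (d.length : Int) := by omega
    rw [PySem.List.pyGetD_eq_getElem d _ hi.1 h1, PySem.List.pyGetD_eq_getElem d _ (by omega) h2]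
    simp only [show (i + 1).toNat = i.toNat + 1 by omega]
    exact h i.toNat (by omega)

-- ===== VERDICT (by name: the statement is the Claim_ definition above) =====
theorem sym_spec : Claim_equal_sym := by
  intro n _
  unfold Spec_sym sym sym_alt
  by_cases h10 : 10 ≤ n
  · rw [if_pos h10, if_neg (by omega)]
    set s := PySem.Int.toChars n with hs
    set d := s.map pvDigit with hd
    have hmap : ∀ i : Int, pvDigit (PySem.List.pyGetD s i '0') = PySem.List.pyGetD d i (pvDigit '0') := by
      intro i; rw [hd, PySem.List.pyGetD_map]
    have hlen : (d.length : Int) = (s.length : Int) := by simp [hd]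
    rw [Bool.eq_iff_iff]
    simp only [beq_iff_eq, Bool.and_eq_true, decide_eq_true_eq]
    rw [pvFoldCount_eq_zero _ 0 le_rfl]
    simp only [true_and, gt_iff_lt]
    have hiff :
        (∀ i ∈ PySem.List.pyRange 0 ((s.length : Int) - 1) 1,
            pvDigit (PySem.List.pyGetD s i '0') < pvDigit (PySem.List.pyGetD s (i + 1) '0')) ↔
          d.Pairwise (· < ·) := by
      rw [← List.isChain_iff_pairwise, ← pvRangeAdj_iff d '0', ← hlen]
      constructor <;> intro h i hi <;> have := h i hi <;> simpa [hmap] using this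
    rw [hiff, ← pvAlt_iff d]
  · rw [if_neg h10, if_pos (by omega)]
    simp [h10]
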